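-- pv_equiv track=rewrite | github.com/TeamEpochGithub/iv-q4-predict-new-medicines-belka | notebooks/binding_site_preds.py | group_adjacent_binding_sites
-- ===== SOURCE A (Python) =====
-- def group_adjacent_binding_sites(tokens, predictions, id2label):
--     binding_sites = set()
--     current_site = []
--
--     for token, prediction in zip(tokens, predictions, strict=False):
--         if token not in ["<pad>", "<cls>", "<eos>"] and prediction == 1:
--             if current_site:
--                 # Check if the current token is adjacent to the last token in the current_site
--                 if ord(token) == ord(current_site[-1][0]) + 1:
--                     current_site.append((token, id2label[prediction]))
--                 else:
--                     binding_sites.add(tuple(current_site))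
--                     current_site = [(token, id2label[prediction])]
--             else:
--                 current_site.append((token, id2label[prediction]))
--         elif current_site:
--             binding_sites.add(tuple(current_site))
--             current_site = []
--
--     # Add the last group if not empty
--     if current_site:
--         binding_sites.add(tuple(current_site))
--
--     return binding_sites
-- ===== SOURCE B (Python) =====
-- def group_adjacent_binding_sites(tokens, predictions, id2label):
--     # Phase 1: split the stream into maximal contiguous runs of valid binding tokens.
--     runs = []
--     run = []
--     for token, prediction in zip(tokens, predictions):
--         if token not in ("<pad>", "<cls>", "<eos>") and prediction == 1:
--             run.append((token, id2label[prediction]))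
--         else:
--             if run:
--                 runs.append(run)
--             run = []
--     if run:
--         runs.append(run)
--
--     # Phase 2: split each run wherever the character code is not the successor
--     # of the previous one, and collect the resulting pieces into a set.
--     sites = set()
--     for run in runs:
--         piece = [run[0]]
--         for prev, cur in zip(run, run[1:]):
--             if ord(cur[0]) == ord(prev[0]) + 1:
--                 piece.append(cur)
--             else:
--                 sites.add(tuple(piece))
--                 piece = [cur]
--         sites.add(tuple(piece))
--     return sites
-- ===== Notes on version B (the rewrite author's own statement) =====
-- stated objective: alternative
-- what changed: Replaces A's single fused loop (which interleaves run tracking, ord-adjacency splitting and set insertion with a last-element probe of the accumulator) by two separate phases: one pass that cuts the stream into maximal runs of valid tokens, then a pairwise zip(run, run[1:]) pass that splits each run at non-consecutive character codes and collects the pieces into the set.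
import Mathlib
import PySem

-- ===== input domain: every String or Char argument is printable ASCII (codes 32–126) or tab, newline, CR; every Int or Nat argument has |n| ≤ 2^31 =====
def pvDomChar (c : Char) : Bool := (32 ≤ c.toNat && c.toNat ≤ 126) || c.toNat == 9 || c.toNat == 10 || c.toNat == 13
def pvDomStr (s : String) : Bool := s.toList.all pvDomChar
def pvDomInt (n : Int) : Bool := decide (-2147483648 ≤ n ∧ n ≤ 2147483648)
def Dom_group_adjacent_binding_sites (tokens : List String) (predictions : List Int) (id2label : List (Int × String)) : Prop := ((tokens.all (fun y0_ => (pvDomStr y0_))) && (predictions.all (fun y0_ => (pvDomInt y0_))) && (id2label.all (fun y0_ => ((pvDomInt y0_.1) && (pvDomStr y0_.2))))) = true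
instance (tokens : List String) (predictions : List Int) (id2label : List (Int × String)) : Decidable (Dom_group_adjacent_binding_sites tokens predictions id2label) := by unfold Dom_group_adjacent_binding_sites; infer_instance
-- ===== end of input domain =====

-- B replaces A's single fused loop by two separate phases (cut into maximal valid runs,
-- then split each run at non-consecutive character codes); same cost, different decomposition.

-- ord(s): exact for single-character strings; Pre_ guarantees every string it is applied to
-- has length 1 (Python's ord raises TypeError otherwise, and those inputs are outside Pre_).
def pyOrd (s : String) : Int :=
  match s.toList with
  | [c] => (c.toNat : Int)
  | _ => -1

-- ===== PORT A =====
-- loop body of A's single fused for-loop (state = (binding_sites, current_site)).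
-- id2label[prediction] is ported as getD … "" — a missing key 1 is a KeyError, outside Pre_.
def gabsLoopA (d : PySem.Dict Int String)
    (st : List (List (String × String)) × List (String × String)) (tp : String × Int) :
    List (List (String × String)) × List (String × String) :=
  if (tp.1 != "<pad>" && tp.1 != "<cls>" && tp.1 != "<eos>") && tp.2 == 1 then
    if st.2.isEmpty then
      (st.1, st.2 ++ [(tp.1, PySem.Dict.getD d tp.2 "")])
    else
      if pyOrd tp.1 == pyOrd (st.2.getLastD ("", "")).1 + 1 then
        (st.1, st.2 ++ [(tp.1, PySem.Dict.getD d tp.2 "")])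
      else
        (PySem.Set.add st.1 st.2, [(tp.1, PySem.Dict.getD d tp.2 "")])
  else
    if st.2.isEmpty then st else (PySem.Set.add st.1 st.2, [])

def group_adjacent_binding_sites (tokens : List String) (predictions : List Int) (id2label : List (Int × String)) : List (List (String × String)) :=
  let d := PySem.Dict.mk id2label
  let st := (List.zip tokens predictions).foldl (gabsLoopA d) (PySem.Set.empty, [])
  if st.2.isEmpty then st.1 else PySem.Set.add st.1 st.2

-- ===== PORT B =====
-- Phase 1 loop body: cut the (token, prediction) stream into maximal runs of valid tokens
-- (state = (finished runs, current run)).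
def gabsPhase1Step (d : PySem.Dict Int String)
    (st : List (List (String × String)) × List (String × String)) (tp : String × Int) :
    List (List (String × String)) × List (String × String) :=
  if (tp.1 != "<pad>" && tp.1 != "<cls>" && tp.1 != "<eos>") && tp.2 == 1 then
    (st.1, st.2 ++ [(tp.1, PySem.Dict.getD d tp.2 "")])
  else
    if st.2.isEmpty then st else (st.1 ++ [st.2], [])

-- Phase 2 inner loop body: walk zip(run, run[1:]) and split at non-consecutive codes
-- (state = (sites, current piece)).
def gabsSplitStep
    (st : List (List (String × String)) × List (String × String)) (pc : (String × String) × (String × String)) :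
    List (List (String × String)) × List (String × String) :=
  if pyOrd pc.2.1 == pyOrd pc.1.1 + 1 then
    (st.1, st.2 ++ [pc.2])
  else
    (PySem.Set.add st.1 st.2, [pc.2])

-- Phase 2 outer loop body: fold one run into the set of sites.
def gabsRunStep (sites : List (List (String × String))) (run : List (String × String)) :
    List (List (String × String)) :=
  match run with
  | [] => sites
  | h :: t =>
    let st := (List.zip (h :: t) t).foldl gabsSplitStep (sites, [h])
    PySem.Set.add st.1 st.2

def group_adjacent_binding_sites_alt (tokens : List String) (predictions : List Int) (id2label : List (Int × String)) : List (List (String × String)) :=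
  let d := PySem.Dict.mk id2label
  let st := (List.zip tokens predictions).foldl (gabsPhase1Step d) ([], [])
  let runs := if st.2.isEmpty then st.1 else st.1 ++ [st.2]
  runs.foldl gabsRunStep PySem.Set.empty

-- ===== PRECONDITION & SPEC =====
-- a (token, prediction) pair the loop treats as a binding token
def pvValid (tp : String × Int) : Bool :=
  (tp.1 != "<pad>" && tp.1 != "<cls>" && tp.1 != "<eos>") && tp.2 == 1

-- Pre_ excludes exactly the inputs on which Python A raises: two adjacent valid binding
-- tokens one of which is not a single character (ord → TypeError), and any valid binding
-- token when id2label has no key 1 (KeyError). A returns normally on every other input.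
def Pre_group_adjacent_binding_sites (tokens : List String) (predictions : List Int) (id2label : List (Int × String)) : Prop :=
  (∀ pr ∈ (List.zip tokens predictions).zip (List.zip tokens predictions).tail,
      pvValid pr.1 = true → pvValid pr.2 = true →
      pr.1.1.toList.length = 1 ∧ pr.2.1.toList.length = 1)
  ∧ ((List.zip tokens predictions).any pvValid = true →
      (PySem.Dict.get? (PySem.Dict.mk id2label) 1).isSome = true)

instance (tokens : List String) (predictions : List Int) (id2label : List (Int × String)) : Decidable (Pre_group_adjacent_binding_sites tokens predictions id2label) := by
  unfold Pre_group_adjacent_binding_sites; infer_instance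

def pvWitness_group_adjacent_binding_sites : List String × List Int × (List (Int × String)) :=
  (["a", "b", "x"], [1, 1, 1], [(1, "BIND")])

def Spec_group_adjacent_binding_sites (tokens : List String) (predictions : List Int) (id2label : List (Int × String)) (out : List (List (String × String))) : Prop := out = group_adjacent_binding_sites_alt tokens predictions id2label
instance (tokens : List String) (predictions : List Int) (id2label : List (Int × String)) (out : List (List (String × String))) : Decidable (Spec_group_adjacent_binding_sites tokens predictions id2label out) := by unfold Spec_group_adjacent_binding_sites; infer_instance

-- ===== CLAIM (what is proved, stated in full; the proofs are below) =====
def Claim_equal_group_adjacent_binding_sites : Prop := ∀ (tokens : List String) (predictions : List Int) (id2label : List (Int × String)), Dom_group_adjacent_binding_sites tokens predictions id2label → Pre_group_adjacent_binding_sites tokens predictions id2label → Spec_group_adjacent_binding_sites tokens predictions id2label (group_adjacent_binding_sites tokens predictions id2label)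

-- ===== LEMMAS AND PROOFS =====

-- label attached to every valid token
def labOf (d : PySem.Dict Int String) (pr : Int) : String := PySem.Dict.getD d pr ""

-- the sequence of pieces A inserts into its set, as one recursion over the stream
def specGo (d : PySem.Dict Int String) : List (String × Int) → List (String × String) → List (List (String × String))
  | [], p => if p.isEmpty then [] else [p]
  | tp :: rest, p =>
    if pvValid tp then
      if p.isEmpty then specGo d rest [(tp.1, labOf d tp.2)]
      else if pyOrd tp.1 == pyOrd (p.getLastD ("", "")).1 + 1 then
        specGo d rest (p ++ [(tp.1, labOf d tp.2)])
      else p :: specGo d rest [(tp.1, labOf d tp.2)]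
    else if p.isEmpty then specGo d rest p else p :: specGo d rest []

-- the maximal runs B's phase 1 produces, as one recursion over the stream
def runsGo (d : PySem.Dict Int String) : List (String × Int) → List (String × String) → List (List (String × String))
  | [], r => if r.isEmpty then [] else [r]
  | tp :: rest, r =>
    if pvValid tp then runsGo d rest (r ++ [(tp.1, labOf d tp.2)])
    else if r.isEmpty then runsGo d rest r else r :: runsGo d rest []

-- splitting one run at non-consecutive codes: (finished pieces, pending piece)
def splitAcc : List (List (String × String)) → List (String × String) → (String × String) → List (String × String) →
    List (List (String × String)) × List (String × String)
  | done, p, _, [] => (done, p)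
  | done, p, prev, c :: cs =>
    if pyOrd c.1 == pyOrd prev.1 + 1 then splitAcc done (p ++ [c]) c cs
    else splitAcc (done ++ [p]) [c] c cs

def splitRunF : List (String × String) → List (List (String × String))
  | [] => []
  | h :: t => (splitAcc [] [h] h t).1 ++ [(splitAcc [] [h] h t).2]

theorem splitAcc_done (t : List (String × String)) :
    ∀ done p prev, splitAcc done p prev t = (done ++ (splitAcc [] p prev t).1, (splitAcc [] p prev t).2) := by
  induction t with
  | nil => intro done p prev; simp [splitAcc]
  | cons c cs ih =>
    intro done p prev
    simp only [splitAcc]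
    split
    · exact ih done (p ++ [c]) c
    · simp only [List.nil_append]
      rw [ih (done ++ [p]) [c] c, ih [p] [c] c]; simp

theorem splitAcc_ne_nil (t : List (String × String)) :
    ∀ done p prev, p ≠ [] → (splitAcc done p prev t).2 ≠ [] := by
  induction t with
  | nil => intro done p prev h; simpa [splitAcc] using h
  | cons c cs ih =>
    intro done p prev h
    simp only [splitAcc]
    split
    · exact ih done (p ++ [c]) c (by simp)
    · exact ih (done ++ [p]) [c] c (by simp)

theorem splitAcc_last (t : List (String × String)) :
    ∀ done p prev, p.getLastD ("", "") = prev →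
      (splitAcc done p prev t).2.getLastD ("", "") = t.getLastD prev := by
  induction t with
  | nil => intro done p prev h; simpa [splitAcc] using h
  | cons c cs ih =>
    intro done p prev h
    simp only [splitAcc, List.getLastD_cons]
    split
    · exact ih done (p ++ [c]) c (by simp [List.getLastD_eq_getLast?])
    · exact ih (done ++ [p]) [c] c rfl

theorem splitAcc_append (t : List (String × String)) :
    ∀ done p prev c,
      splitAcc done p prev (t ++ [c]) =
        if pyOrd c.1 == pyOrd (t.getLastD prev).1 + 1 then
          ((splitAcc done p prev t).1, (splitAcc done p prev t).2 ++ [c])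
        else
          ((splitAcc done p prev t).1 ++ [(splitAcc done p prev t).2], [c]) := by
  induction t with
  | nil => intro done p prev c; simp [splitAcc, List.getLastD]
  | cons c' cs ih =>
    intro done p prev c
    simp only [List.cons_append, splitAcc, List.getLastD_cons]
    by_cases h : (pyOrd c'.1 == pyOrd prev.1 + 1) = true
    · simp only [if_pos h]
      exact ih done (p ++ [c']) c' c
    · simp only [if_neg h]
      exact ih (done ++ [p]) [c'] c' c

-- A's fused loop computes exactly foldl-add over specGo
theorem loopA_spec (d : PySem.Dict Int String) (zs : List (String × Int)) :
    ∀ S p,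
      (let st := zs.foldl (gabsLoopA d) (S, p)
       if st.2.isEmpty then st.1 else PySem.Set.add st.1 st.2) =
      (specGo d zs p).foldl PySem.Set.add S := by
  induction zs with
  | nil =>
    intro S p
    by_cases he : p.isEmpty = true
    · simp [specGo, he]
    · simp [specGo, he]
  | cons tp rest ih =>
    intro S p
    simp only [List.foldl_cons, specGo, gabsLoopA, pvValid, labOf]
    by_cases hv : ((tp.1 != "<pad>" && tp.1 != "<cls>" && tp.1 != "<eos>") && tp.2 == 1) = true
    · rw [if_pos hv, if_pos hv]
      by_cases he : p.isEmpty = true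
      · rw [if_pos he, if_pos he, List.isEmpty_iff.mp he]
        exact ih S [(tp.1, PySem.Dict.getD d tp.2 "")]
      · rw [if_neg he, if_neg he]
        by_cases ha : (pyOrd tp.1 == pyOrd (p.getLastD ("", "")).1 + 1) = true
        · rw [if_pos ha, if_pos ha]
          exact ih S (p ++ [(tp.1, PySem.Dict.getD d tp.2 "")])
        · rw [if_neg ha, if_neg ha, List.foldl_cons]
          exact ih (PySem.Set.add S p) [(tp.1, PySem.Dict.getD d tp.2 "")]
    · rw [if_neg hv, if_neg hv]
      by_cases he : p.isEmpty = true
      · rw [if_pos he, if_pos he]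
        exact ih S p
      · rw [if_neg he, if_neg he, List.foldl_cons]
        exact ih (PySem.Set.add S p) []

-- B's phase 1 computes exactly runsGo
theorem phase1_spec (d : PySem.Dict Int String) (zs : List (String × Int)) :
    ∀ R r,
      (let st := zs.foldl (gabsPhase1Step d) (R, r)
       if st.2.isEmpty then st.1 else st.1 ++ [st.2]) =
      R ++ runsGo d zs r := by
  induction zs with
  | nil =>
    intro R r
    by_cases he : r.isEmpty = true
    · simp [runsGo, he]
    · simp [runsGo, he]
  | cons tp rest ih =>
    intro R r
    simp only [List.foldl_cons, runsGo, gabsPhase1Step, pvValid, labOf]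
    by_cases hv : ((tp.1 != "<pad>" && tp.1 != "<cls>" && tp.1 != "<eos>") && tp.2 == 1) = true
    · rw [if_pos hv, if_pos hv]
      exact ih R (r ++ [(tp.1, PySem.Dict.getD d tp.2 "")])
    · rw [if_neg hv, if_neg hv]
      by_cases he : r.isEmpty = true
      · rw [if_pos he, if_pos he]
        exact ih R r
      · rw [if_neg he, if_neg he, ih (R ++ [r]) [], List.append_assoc]
        rfl

-- B's phase 2 inner loop over one run computes foldl-add over that run's pieces
theorem split_spec (t : List (String × String)) :
    ∀ prev sites p,
      (let st := (List.zip (prev :: t) t).foldl gabsSplitStep (sites, p)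
       PySem.Set.add st.1 st.2) =
      ((splitAcc [] p prev t).1 ++ [(splitAcc [] p prev t).2]).foldl PySem.Set.add sites := by
  induction t with
  | nil => intro prev sites p; simp [splitAcc]
  | cons c cs ih =>
    intro prev sites p
    simp only [List.zip_cons_cons, List.foldl_cons, gabsSplitStep, splitAcc]
    by_cases ha : (pyOrd c.1 == pyOrd prev.1 + 1) = true
    · simp [ha, ih]
    · simp only [ha, Bool.false_eq_true, if_false, List.nil_append]
      rw [splitAcc_done cs [p] [c] c]
      simpa using ih c (PySem.Set.add sites p) [c]

-- B's phase 2 outer loop computes foldl-add over the concatenation of all pieces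
theorem phase2_spec (runs : List (List (String × String))) :
    ∀ sites,
      runs.foldl gabsRunStep sites =
      (runs.flatMap splitRunF).foldl PySem.Set.add sites := by
  induction runs with
  | nil => intro sites; simp
  | cons run rs ih =>
    intro sites
    simp only [List.foldl_cons, List.flatMap_cons, List.foldl_append]
    match run with
    | [] => simp [gabsRunStep, splitRunF, ih]
    | h :: t =>
      show rs.foldl gabsRunStep (gabsRunStep sites (h :: t)) = _
      rw [ih, gabsRunStep, split_spec t h sites [h]]
      rfl

-- the pieces of the maximal runs are exactly the pieces A's fused loop emits
theorem runs_pieces (d : PySem.Dict Int String) (zs : List (String × Int)) :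
    ((runsGo d zs []).flatMap splitRunF = specGo d zs []) ∧
    (∀ t h, (runsGo d zs (h :: t)).flatMap splitRunF =
      (splitAcc [] [h] h t).1 ++ specGo d zs (splitAcc [] [h] h t).2) := by
  induction zs with
  | nil =>
    constructor
    · simp [runsGo, specGo]
    · intro t h
      have hne := splitAcc_ne_nil t [] [h] h (by simp)
      simp [runsGo, specGo, splitRunF, List.isEmpty_iff, hne]
  | cons tp rest ih =>
    have ih1 := ih.1
    have ih2 := ih.2
    constructor
    · simp only [runsGo, specGo]
      by_cases hv : pvValid tp = true
      · simpa [hv, splitAcc] using ih2 [] (tp.1, labOf d tp.2)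
      · simp [hv, ih1]
    · intro t h
      have hne := splitAcc_ne_nil t [] [h] h (by simp)
      have hlast := splitAcc_last t [] [h] h (by simp)
      simp only [runsGo, specGo]
      by_cases hv : pvValid tp = true
      · have hrw := ih2 (t ++ [(tp.1, labOf d tp.2)]) h
        rw [show (h :: t) ++ [(tp.1, labOf d tp.2)] = h :: (t ++ [(tp.1, labOf d tp.2)]) from rfl] at *
        rw [hv, if_pos rfl] at *
        simp only [List.isEmpty_iff, hne, hlast]
        rw [hrw, splitAcc_append t [] [h] h (tp.1, labOf d tp.2)]
        by_cases ha : pyOrd tp.1 = pyOrd (t.getLast?.getD h).1 + 1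
        · simp [ha]
        · simp [ha]
      · simp only [hv, Bool.false_eq_true, if_false, List.isEmpty_iff, hne]
        simp [splitRunF, ih1]

-- ===== VERDICT (by name: the statement is the Claim_ definition above) =====
theorem group_adjacent_binding_sites_spec : Claim_equal_group_adjacent_binding_sites := by
  intro tokens predictions id2label _ _
  show group_adjacent_binding_sites tokens predictions id2label
      = group_adjacent_binding_sites_alt tokens predictions id2label
  have hA : group_adjacent_binding_sites tokens predictions id2label
      = (specGo (PySem.Dict.mk id2label) (List.zip tokens predictions) []).foldl PySem.Set.add PySem.Set.empty :=
    loopA_spec (PySem.Dict.mk id2label) (List.zip tokens predictions) PySem.Set.empty []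
  have hB : group_adjacent_binding_sites_alt tokens predictions id2label
      = List.foldl gabsRunStep PySem.Set.empty ([] ++ runsGo (PySem.Dict.mk id2label) (List.zip tokens predictions) []) :=
    congrArg (List.foldl gabsRunStep PySem.Set.empty) (phase1_spec (PySem.Dict.mk id2label) (List.zip tokens predictions) [] [])
  rw [hA, hB, List.nil_append, phase2_spec, (runs_pieces (PySem.Dict.mk id2label) (List.zip tokens predictions)).1]
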